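-- pv_equiv track=rewrite | github.com/aizanzafar/crane | kg/cosine_sorted_fol_roco.py | apply_rules_to_kg
-- ===== SOURCE A (Python) =====
-- def remove_duplicate(kg_triplets):
--     res = []
--     [res.append(x) for x in kg_triplets if x not in res]
--     return res
--
-- def parse_triple(kg_triplets):
--     kg_len = len(kg_triplets)
--     empty = ["_NAF_H", "_NAF_R", "_NAF_O"]
--     if kg_len <= 20:
--         tt = 20 - kg_len
--         for _ in range(tt):
--             kg_triplets.append(empty)
--     return kg_triplets
--
-- def apply_rules_to_kg(kg_triplets):
--     co_occurs_triplets, prevent_triplets = [], []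
--     treatment_triplets, diagnosis_triplets = [], []
--     conjunction_triplets, disjunction_triplets = [], []
--
--     for triplet in kg_triplets:
--         if triplet[1] == "co-occurs_with":
--             for other_triplet in kg_triplets:
--                 if other_triplet[0] == triplet[2] and other_triplet[1] == "affects":
--                     co_occurs_triplets.append([triplet[0], "affects", other_triplet[2]])
--
--         if triplet[1] == "prevents":
--             for other_triplet in kg_triplets:
--                 if other_triplet[0] == triplet[2] and other_triplet[1] == "causes":
--                     prevent_triplets.append([triplet[0], "prevents", other_triplet[2]])
--
--         if triplet[1] == "treats":
--             for other_triplet in kg_triplets: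
--                 if other_triplet[0] == triplet[2] and other_triplet[1] == "isa":
--                     treatment_triplets.append([triplet[0], "treats", other_triplet[2]])
--
--         if triplet[1] == "diagnoses":
--             for other_triplet in kg_triplets:
--                 if other_triplet[0] == triplet[0] and other_triplet[1] == "interacts_with":
--                     diagnosis_triplets.append([other_triplet[2], "diagnoses", triplet[0]])
--
--         if triplet[1] == "co-occurs_with":
--             for other_triplet in kg_triplets:
--                 if other_triplet[0] == triplet[0] and other_triplet[1] == "affects":
--                     conjunction_triplets.append([triplet[2], "co-occurs_with", other_triplet[2]])
--
--         if triplet[1] == "prevents":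
--             X, Y = triplet[0], triplet[2]
--             for other_triplet in kg_triplets:
--                 if other_triplet[1] == "causes" and other_triplet[0] == Y:
--                     Z = other_triplet[2]
--                     disjunction_triplets.append([X, "prevents", Z])
--                     disjunction_triplets.append([X, "causes", Z])
--
--     return (
--         remove_duplicate(parse_triple(remove_duplicate(co_occurs_triplets))),
--         remove_duplicate(parse_triple(remove_duplicate(prevent_triplets))),
--         remove_duplicate(parse_triple(remove_duplicate(treatment_triplets))),
--         remove_duplicate(parse_triple(remove_duplicate(diagnosis_triplets))),
--         remove_duplicate(parse_triple(remove_duplicate(conjunction_triplets))),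
--         remove_duplicate(parse_triple(remove_duplicate(disjunction_triplets))),
--     )
-- ===== SOURCE B (Python) =====
-- def apply_rules_to_kg(kg_triplets):
--     # One pass builds a (relation, head) -> [tails] index; each rule then joins
--     # against the index instead of rescanning kg_triplets.
--     pairs = [((t[1], t[0]), t[2]) for t in kg_triplets]
--     idx = {}
--     for key, tail in pairs:
--         idx[key] = idx.get(key, []) + [tail]
--
--     def tails(rel, head):
--         return idx.get((rel, head), [])
--
--     co, pre, tre, dia, con, dis = [], [], [], [], [], []
--     for t in kg_triplets:
--         r = t[1]
--         if r == "co-occurs_with":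
--             co = co + [[t[0], "affects", z] for z in tails("affects", t[2])]
--             con = con + [[t[2], "co-occurs_with", z] for z in tails("affects", t[0])]
--         elif r == "prevents":
--             pre = pre + [[t[0], "prevents", z] for z in tails("causes", t[2])]
--             for z in tails("causes", t[2]):
--                 dis = dis + [[t[0], "prevents", z], [t[0], "causes", z]]
--         elif r == "treats":
--             tre = tre + [[t[0], "treats", z] for z in tails("isa", t[2])]
--         elif r == "diagnoses":
--             dia = dia + [[z, "diagnoses", t[0]] for z in tails("interacts_with", t[0])]
--
--     def dedup_pad(lst):
--         out = []
--         for x in lst: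
--             if x not in out:
--                 out.append(x)
--         if len(out) < 20:
--             out.append(["_NAF_H", "_NAF_R", "_NAF_O"])
--         return out
--
--     return (dedup_pad(co), dedup_pad(pre), dedup_pad(tre),
--             dedup_pad(dia), dedup_pad(con), dedup_pad(dis))
-- ===== Notes on version B (the rewrite author's own statement) =====
-- stated objective: alternative
-- what changed: B builds a (relation, head) -> tails index in one pass and joins each rule against it, instead of A's nested rescans of kg_triplets per rule-matching triplet, and collapses A's dedup/pad-to-20/dedup pipeline into one dedup plus a single pad entry.
import Mathlib
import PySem

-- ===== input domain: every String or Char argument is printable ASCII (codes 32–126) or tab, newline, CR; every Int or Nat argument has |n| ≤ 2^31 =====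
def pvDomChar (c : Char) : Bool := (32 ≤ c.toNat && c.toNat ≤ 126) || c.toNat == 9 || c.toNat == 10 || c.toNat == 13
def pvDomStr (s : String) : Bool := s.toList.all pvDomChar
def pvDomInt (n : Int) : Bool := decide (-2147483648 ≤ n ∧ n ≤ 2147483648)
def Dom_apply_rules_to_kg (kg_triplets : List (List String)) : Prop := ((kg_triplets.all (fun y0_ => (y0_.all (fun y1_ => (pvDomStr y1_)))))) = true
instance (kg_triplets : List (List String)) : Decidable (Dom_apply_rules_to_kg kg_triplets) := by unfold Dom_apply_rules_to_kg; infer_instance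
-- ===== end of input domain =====

-- B replaces A's rescans of kg_triplets by a (relation, head) → tails index built in one
-- pass, and replaces A's dedup / pad-to-20 / dedup pipeline by one dedup plus one pad entry.


-- ===== PORT A =====
-- t[i]: Pre_ guarantees every triplet has ≥ 3 fields, so the default "" is never consulted.
def pvGetS (t : List String) (i : Int) : String := PySem.List.pyGetD t i ""

def nafTriple : List String := ["_NAF_H", "_NAF_R", "_NAF_O"]

def remove_duplicate (kg_triplets : List (List String)) : List (List String) :=
  kg_triplets.foldl (fun res x => if x ∈ res then res else res ++ [x]) []

def parse_triple (kg_triplets : List (List String)) : List (List String) :=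
  if kg_triplets.length ≤ 20 then
    kg_triplets ++ List.replicate (20 - kg_triplets.length) nafTriple
  else kg_triplets

def aFinal (xs : List (List String)) : List (List String) :=
  remove_duplicate (parse_triple (remove_duplicate xs))

def aStep (kg : List (List String))
    (acc : List (List String) × List (List String) × List (List String) × List (List String) × List (List String) × List (List String))
    (t : List String) :
    List (List String) × List (List String) × List (List String) × List (List String) × List (List String) × List (List String) :=
  match acc with
  | (co, pre, tre, dia, con, dis) =>
    let co := if pvGetS t 1 = "co-occurs_with" then
        kg.foldl (fun l o => if pvGetS o 0 = pvGetS t 2 ∧ pvGetS o 1 = "affects" then l ++ [[pvGetS t 0, "affects", pvGetS o 2]] else l) co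
      else co
    let pre := if pvGetS t 1 = "prevents" then
        kg.foldl (fun l o => if pvGetS o 0 = pvGetS t 2 ∧ pvGetS o 1 = "causes" then l ++ [[pvGetS t 0, "prevents", pvGetS o 2]] else l) pre
      else pre
    let tre := if pvGetS t 1 = "treats" then
        kg.foldl (fun l o => if pvGetS o 0 = pvGetS t 2 ∧ pvGetS o 1 = "isa" then l ++ [[pvGetS t 0, "treats", pvGetS o 2]] else l) tre
      else tre
    let dia := if pvGetS t 1 = "diagnoses" then
        kg.foldl (fun l o => if pvGetS o 0 = pvGetS t 0 ∧ pvGetS o 1 = "interacts_with" then l ++ [[pvGetS o 2, "diagnoses", pvGetS t 0]] else l) dia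
      else dia
    let con := if pvGetS t 1 = "co-occurs_with" then
        kg.foldl (fun l o => if pvGetS o 0 = pvGetS t 0 ∧ pvGetS o 1 = "affects" then l ++ [[pvGetS t 2, "co-occurs_with", pvGetS o 2]] else l) con
      else con
    let dis := if pvGetS t 1 = "prevents" then
        kg.foldl (fun l o => if pvGetS o 1 = "causes" ∧ pvGetS o 0 = pvGetS t 2 then l ++ [[pvGetS t 0, "prevents", pvGetS o 2], [pvGetS t 0, "causes", pvGetS o 2]] else l) dis
      else dis
    (co, pre, tre, dia, con, dis)

def apply_rules_to_kg (kg_triplets : List (List String)) : List (List String) × List (List String) × List (List String) × List (List String) × List (List String) × List (List String) :=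
  let r := kg_triplets.foldl (aStep kg_triplets) ([], [], [], [], [], [])
  (aFinal r.1, aFinal r.2.1, aFinal r.2.2.1, aFinal r.2.2.2.1, aFinal r.2.2.2.2.1, aFinal r.2.2.2.2.2)

-- ===== PORT B =====
def buildIdx (kg : List (List String)) : PySem.Dict (String × String) (List String) :=
  (kg.map (fun t => ((pvGetS t 1, pvGetS t 0), pvGetS t 2))).foldl
    (fun d p => d.modify p.1 [] (fun l => l ++ [p.2])) PySem.Dict.empty

def tails (idx : PySem.Dict (String × String) (List String)) (rel head : String) : List String :=
  idx.getD (rel, head) []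

def bStep (idx : PySem.Dict (String × String) (List String))
    (acc : List (List String) × List (List String) × List (List String) × List (List String) × List (List String) × List (List String))
    (t : List String) :
    List (List String) × List (List String) × List (List String) × List (List String) × List (List String) × List (List String) :=
  match acc with
  | (co, pre, tre, dia, con, dis) =>
    if pvGetS t 1 = "co-occurs_with" then
      (co ++ (tails idx "affects" (pvGetS t 2)).map (fun z => [pvGetS t 0, "affects", z]),
       pre, tre, dia,
       con ++ (tails idx "affects" (pvGetS t 0)).map (fun z => [pvGetS t 2, "co-occurs_with", z]),
       dis)
    else if pvGetS t 1 = "prevents" then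
      (co,
       pre ++ (tails idx "causes" (pvGetS t 2)).map (fun z => [pvGetS t 0, "prevents", z]),
       tre, dia, con,
       dis ++ (tails idx "causes" (pvGetS t 2)).flatMap
         (fun z => [[pvGetS t 0, "prevents", z], [pvGetS t 0, "causes", z]]))
    else if pvGetS t 1 = "treats" then
      (co, pre, tre ++ (tails idx "isa" (pvGetS t 2)).map (fun z => [pvGetS t 0, "treats", z]), dia, con, dis)
    else if pvGetS t 1 = "diagnoses" then
      (co, pre, tre, dia ++ (tails idx "interacts_with" (pvGetS t 0)).map (fun z => [z, "diagnoses", pvGetS t 0]), con, dis)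
    else (co, pre, tre, dia, con, dis)

def dedup_pad (lst : List (List String)) : List (List String) :=
  let out := lst.foldl (fun res x => if x ∈ res then res else res ++ [x]) []
  if out.length < 20 then out ++ [nafTriple] else out

def apply_rules_to_kg_alt (kg_triplets : List (List String)) : List (List String) × List (List String) × List (List String) × List (List String) × List (List String) × List (List String) :=
  let idx := buildIdx kg_triplets
  let r := kg_triplets.foldl (bStep idx) ([], [], [], [], [], [])
  (dedup_pad r.1, dedup_pad r.2.1, dedup_pad r.2.2.1, dedup_pad r.2.2.2.1, dedup_pad r.2.2.2.2.1, dedup_pad r.2.2.2.2.2)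

-- ===== PRECONDITION & SPEC =====
-- Pre_ restricts to well-formed triplets (≥ 3 fields): on shorter entries Python A raises
-- IndexError except when, accidentally, no rule relation makes it read the missing field,
-- and B's index build reads all three fields and raises there.
def Pre_apply_rules_to_kg (kg_triplets : List (List String)) : Prop :=
  ∀ t ∈ kg_triplets, 3 ≤ t.length
instance (kg_triplets : List (List String)) : Decidable (Pre_apply_rules_to_kg kg_triplets) := by
  unfold Pre_apply_rules_to_kg; infer_instance

def pvWitness_apply_rules_to_kg : List (List String) :=
  [["a", "co-occurs_with", "b"], ["b", "affects", "c"], ["a", "prevents", "d"], ["d", "causes", "e"]]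

def Spec_apply_rules_to_kg (kg_triplets : List (List String)) (out : List (List String) × List (List String) × List (List String) × List (List String) × List (List String) × List (List String)) : Prop := out = apply_rules_to_kg_alt kg_triplets
instance (kg_triplets : List (List String)) (out : List (List String) × List (List String) × List (List String) × List (List String) × List (List String) × List (List String)) : Decidable (Spec_apply_rules_to_kg kg_triplets out) := by
  unfold Spec_apply_rules_to_kg
  have h4 : DecidableEq (List (List String) × List (List String) × List (List String) × List (List String)) := inferInstance
  have h5 : DecidableEq (List (List String) × List (List String) × List (List String) × List (List String) × List (List String)) := @instDecidableEqProd _ _ inferInstance h4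
  have h6 : DecidableEq (List (List String) × List (List String) × List (List String) × List (List String) × List (List String) × List (List String)) := @instDecidableEqProd _ _ inferInstance h5
  exact h6 _ _

-- ===== CLAIM (what is proved, stated in full; the proofs are below) =====
def Claim_equal_apply_rules_to_kg : Prop := ∀ (kg_triplets : List (List String)), Dom_apply_rules_to_kg kg_triplets → Pre_apply_rules_to_kg kg_triplets → Spec_apply_rules_to_kg kg_triplets (apply_rules_to_kg kg_triplets)

-- ===== LEMMAS AND PROOFS =====

-- The index lookup is exactly "tails of the kg entries with this (relation, head)".
theorem tails_spec (kg : List (List String)) (rel x : String) :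
    tails (buildIdx kg) rel x
      = (kg.filter (fun o => decide (pvGetS o 0 = x ∧ pvGetS o 1 = rel))).map (fun o => pvGetS o 2) := by
  unfold tails buildIdx
  rw [PySem.Dict.getD_foldl_modify_append, List.filter_map, List.map_map]
  simp only [PySem.Dict.getD_empty, List.nil_append]
  rw [List.filter_congr (fun o (_ : o ∈ kg) => by
    show ((pvGetS o 1, pvGetS o 0) == (rel, x)) = decide (pvGetS o 0 = x ∧ pvGetS o 1 = rel)
    rw [Bool.eq_iff_iff]
    simp [and_comm])]
  exact List.map_congr_left (fun o _ => rfl)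

-- A's inner scan of kg, as a flatMap over the matching entries.
theorem foldl_if_append (kg : List (List String)) (p : List String → Prop) [DecidablePred p]
    (E : List String → List (List String)) (cur : List (List String)) :
    kg.foldl (fun l o => if p o then l ++ E o else l) cur
      = cur ++ (kg.filter (fun o => decide (p o))).flatMap E := by
  induction kg generalizing cur with
  | nil => simp
  | cons h t ih =>
    by_cases hp : p h
    · simp [hp, ih]
    · simp [hp, ih]

-- the six join shapes, one per rule
theorem join_co (kg : List (List String)) (cur : List (List String)) (t : List String) :
    kg.foldl (fun l o => if pvGetS o 0 = pvGetS t 2 ∧ pvGetS o 1 = "affects" then l ++ [[pvGetS t 0, "affects", pvGetS o 2]] else l) cur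
      = cur ++ (tails (buildIdx kg) "affects" (pvGetS t 2)).map (fun z => [pvGetS t 0, "affects", z]) := by
  rw [foldl_if_append kg (fun o => pvGetS o 0 = pvGetS t 2 ∧ pvGetS o 1 = "affects")
    (fun o => [[pvGetS t 0, "affects", pvGetS o 2]]) cur, tails_spec, List.map_map,
    ← List.map_eq_flatMap]
  rfl

theorem join_pre (kg : List (List String)) (cur : List (List String)) (t : List String) :
    kg.foldl (fun l o => if pvGetS o 0 = pvGetS t 2 ∧ pvGetS o 1 = "causes" then l ++ [[pvGetS t 0, "prevents", pvGetS o 2]] else l) cur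
      = cur ++ (tails (buildIdx kg) "causes" (pvGetS t 2)).map (fun z => [pvGetS t 0, "prevents", z]) := by
  rw [foldl_if_append kg (fun o => pvGetS o 0 = pvGetS t 2 ∧ pvGetS o 1 = "causes")
    (fun o => [[pvGetS t 0, "prevents", pvGetS o 2]]) cur, tails_spec, List.map_map,
    ← List.map_eq_flatMap]
  rfl

theorem join_tre (kg : List (List String)) (cur : List (List String)) (t : List String) :
    kg.foldl (fun l o => if pvGetS o 0 = pvGetS t 2 ∧ pvGetS o 1 = "isa" then l ++ [[pvGetS t 0, "treats", pvGetS o 2]] else l) cur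
      = cur ++ (tails (buildIdx kg) "isa" (pvGetS t 2)).map (fun z => [pvGetS t 0, "treats", z]) := by
  rw [foldl_if_append kg (fun o => pvGetS o 0 = pvGetS t 2 ∧ pvGetS o 1 = "isa")
    (fun o => [[pvGetS t 0, "treats", pvGetS o 2]]) cur, tails_spec, List.map_map,
    ← List.map_eq_flatMap]
  rfl

theorem join_dia (kg : List (List String)) (cur : List (List String)) (t : List String) :
    kg.foldl (fun l o => if pvGetS o 0 = pvGetS t 0 ∧ pvGetS o 1 = "interacts_with" then l ++ [[pvGetS o 2, "diagnoses", pvGetS t 0]] else l) cur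
      = cur ++ (tails (buildIdx kg) "interacts_with" (pvGetS t 0)).map (fun z => [z, "diagnoses", pvGetS t 0]) := by
  rw [foldl_if_append kg (fun o => pvGetS o 0 = pvGetS t 0 ∧ pvGetS o 1 = "interacts_with")
    (fun o => [[pvGetS o 2, "diagnoses", pvGetS t 0]]) cur, tails_spec, List.map_map,
    ← List.map_eq_flatMap]
  rfl

theorem join_con (kg : List (List String)) (cur : List (List String)) (t : List String) :
    kg.foldl (fun l o => if pvGetS o 0 = pvGetS t 0 ∧ pvGetS o 1 = "affects" then l ++ [[pvGetS t 2, "co-occurs_with", pvGetS o 2]] else l) cur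
      = cur ++ (tails (buildIdx kg) "affects" (pvGetS t 0)).map (fun z => [pvGetS t 2, "co-occurs_with", z]) := by
  rw [foldl_if_append kg (fun o => pvGetS o 0 = pvGetS t 0 ∧ pvGetS o 1 = "affects")
    (fun o => [[pvGetS t 2, "co-occurs_with", pvGetS o 2]]) cur, tails_spec, List.map_map,
    ← List.map_eq_flatMap]
  rfl

theorem join_dis (kg : List (List String)) (cur : List (List String)) (t : List String) :
    kg.foldl (fun l o => if pvGetS o 1 = "causes" ∧ pvGetS o 0 = pvGetS t 2 then l ++ [[pvGetS t 0, "prevents", pvGetS o 2], [pvGetS t 0, "causes", pvGetS o 2]] else l) cur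
      = cur ++ (tails (buildIdx kg) "causes" (pvGetS t 2)).flatMap
          (fun z => [[pvGetS t 0, "prevents", z], [pvGetS t 0, "causes", z]]) := by
  rw [foldl_if_append kg (fun o => pvGetS o 1 = "causes" ∧ pvGetS o 0 = pvGetS t 2)
    (fun o => [[pvGetS t 0, "prevents", pvGetS o 2], [pvGetS t 0, "causes", pvGetS o 2]]) cur,
    tails_spec, List.flatMap_map,
    List.filter_congr (fun o (_ : o ∈ kg) => by
      simp only [Bool.decide_and, Bool.and_comm] : ∀ o ∈ kg,
        decide (pvGetS o 1 = "causes" ∧ pvGetS o 0 = pvGetS t 2)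
          = decide (pvGetS o 0 = pvGetS t 2 ∧ pvGetS o 1 = "causes"))]

-- A's per-triplet update equals B's index-join update.
theorem step_eq (kg : List (List String))
    (acc : List (List String) × List (List String) × List (List String) × List (List String) × List (List String) × List (List String))
    (t : List String) : aStep kg acc t = bStep (buildIdx kg) acc t := by
  obtain ⟨co, pre, tre, dia, con, dis⟩ := acc
  by_cases h1 : pvGetS t 1 = "co-occurs_with" <;>
    by_cases h2 : pvGetS t 1 = "prevents" <;>
      by_cases h3 : pvGetS t 1 = "treats" <;>
        by_cases h4 : pvGetS t 1 = "diagnoses" <;>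
          simp_all [aStep, bStep, join_co, join_pre, join_tre, join_dia, join_con, join_dis]

-- No emitted triplet is the padding triplet (its relation field is a rule name).
def NafFree6 (r : List (List String) × List (List String) × List (List String) × List (List String) × List (List String) × List (List String)) : Prop :=
  nafTriple ∉ r.1 ∧ nafTriple ∉ r.2.1 ∧ nafTriple ∉ r.2.2.1 ∧ nafTriple ∉ r.2.2.2.1 ∧
    nafTriple ∉ r.2.2.2.2.1 ∧ nafTriple ∉ r.2.2.2.2.2

theorem bStep_nafFree (idx : PySem.Dict (String × String) (List String))
    (acc : List (List String) × List (List String) × List (List String) × List (List String) × List (List String) × List (List String))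
    (t : List String) (h : NafFree6 acc) : NafFree6 (bStep idx acc t) := by
  obtain ⟨co, pre, tre, dia, con, dis⟩ := acc
  obtain ⟨h1, h2, h3, h4, h5, h6⟩ := h
  unfold bStep NafFree6 nafTriple at *
  split_ifs <;> simp_all [List.mem_append, List.mem_map, List.mem_flatMap]

theorem foldl_bStep_nafFree (idx : PySem.Dict (String × String) (List String))
    (l : List (List String))
    (acc : List (List String) × List (List String) × List (List String) × List (List String) × List (List String) × List (List String))
    (h : NafFree6 acc) : NafFree6 (l.foldl (bStep idx) acc) := by
  induction l generalizing acc with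
  | nil => exact h
  | cons x xs ih => exact ih _ (bStep_nafFree idx acc x h)

-- dedup-loop facts
theorem dstep_mem (xs : List (List String)) (acc : List (List String)) (x : List String)
    (h : x ∈ xs.foldl (fun res y => if y ∈ res then res else res ++ [y]) acc) :
    x ∈ acc ∨ x ∈ xs := by
  induction xs generalizing acc with
  | nil => exact Or.inl h
  | cons y ys ih =>
    simp only [List.foldl_cons] at h
    rcases ih _ h with hm | hm
    · by_cases hy : y ∈ acc
      · simp [hy] at hm; exact Or.inl hm
      · simp [hy, List.mem_append] at hm
        rcases hm with hm | hm
        · exact Or.inl hm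
        · simp [hm]
    · simp [hm]

theorem dstep_nodup (xs : List (List String)) (acc : List (List String)) (h : acc.Nodup) :
    (xs.foldl (fun res y => if y ∈ res then res else res ++ [y]) acc).Nodup := by
  induction xs generalizing acc with
  | nil => exact h
  | cons y ys ih =>
    simp only [List.foldl_cons]
    by_cases hy : y ∈ acc
    · simpa [hy] using ih _ h
    · refine ih _ ?_
      simp only [hy, if_false]
      rw [List.nodup_append]
      exact ⟨h, List.nodup_singleton y, by
        intro a ha b hb
        rw [List.mem_singleton] at hb
        subst hb
        exact fun hab => hy (hab ▸ ha)⟩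

theorem dstep_fresh (xs : List (List String)) (acc : List (List String)) (hnd : xs.Nodup)
    (hdisj : ∀ x ∈ xs, x ∉ acc) :
    xs.foldl (fun res y => if y ∈ res then res else res ++ [y]) acc = acc ++ xs := by
  induction xs generalizing acc with
  | nil => simp
  | cons y ys ih =>
    have hy : y ∉ acc := hdisj y (by simp)
    simp only [List.foldl_cons, if_neg hy]
    rw [ih (acc ++ [y]) hnd.of_cons]
    · simp
    · intro x hx
      simp only [List.mem_append, List.mem_singleton]
      rintro (hc | rfl)
      · exact hdisj x (by simp [hx]) hc
      · exact (List.nodup_cons.mp hnd).1 hx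

theorem dstep_absorb (xs : List (List String)) (acc : List (List String))
    (h : ∀ x ∈ xs, x ∈ acc) :
    xs.foldl (fun res y => if y ∈ res then res else res ++ [y]) acc = acc := by
  induction xs generalizing acc with
  | nil => rfl
  | cons y ys ih =>
    have : y ∈ acc := h y (by simp)
    simp only [List.foldl_cons, if_pos this]
    exact ih _ (fun x hx => h x (by simp [hx]))

theorem final_eq (xs : List (List String)) (h : nafTriple ∉ xs) :
    aFinal xs = dedup_pad xs := by
  unfold aFinal dedup_pad parse_triple remove_duplicate
  set d := xs.foldl (fun res y => if y ∈ res then res else res ++ [y]) [] with hd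
  have hdnd : d.Nodup := dstep_nodup xs [] (by simp)
  have hnaf : nafTriple ∉ d := by
    intro hm
    rcases dstep_mem xs [] nafTriple hm with h' | h'
    · exact absurd h' (List.not_mem_nil)
    · exact h h'
  have hself : d.foldl (fun res y => if y ∈ res then res else res ++ [y]) [] = d := by
    simpa using dstep_fresh d [] hdnd (by simp)
  by_cases hlen : d.length ≤ 20
  · rw [if_pos hlen]
    by_cases hlt : d.length < 20
    · rw [if_pos hlt]
      have hk : 20 - d.length = (20 - d.length - 1) + 1 := by omega
      rw [hk, List.replicate_succ, List.foldl_append, hself]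
      simp only [List.foldl_cons, if_neg hnaf]
      exact dstep_absorb _ _ (by intro x hx; rw [List.eq_of_mem_replicate hx]; simp)
    · have : 20 - d.length = 0 := by omega
      rw [this, if_neg hlt]
      simpa using hself
  · rw [if_neg hlen, if_neg (by omega), hself]

-- ===== VERDICT (by name: the statement is the Claim_ definition above) =====
theorem apply_rules_to_kg_spec : Claim_equal_apply_rules_to_kg := by
  intro kg _hdom _hpre
  unfold Spec_apply_rules_to_kg apply_rules_to_kg apply_rules_to_kg_alt
  have hraw : kg.foldl (aStep kg) ([], [], [], [], [], [])
      = kg.foldl (bStep (buildIdx kg)) ([], [], [], [], [], []) :=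
    PySem.List.foldl_congr_mem kg (aStep kg) (bStep (buildIdx kg)) ([], [], [], [], [], [])
      (fun acc t _ => step_eq kg acc t)
  have hfree : NafFree6 (kg.foldl (bStep (buildIdx kg)) ([], [], [], [], [], [])) :=
    foldl_bStep_nafFree _ kg _ (by simp [NafFree6])
  obtain ⟨f1, f2, f3, f4, f5, f6⟩ := hfree
  simp only [hraw]
  exact Prod.ext (final_eq _ f1) (Prod.ext (final_eq _ f2) (Prod.ext (final_eq _ f3)
    (Prod.ext (final_eq _ f4) (Prod.ext (final_eq _ f5) (final_eq _ f6)))))
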